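-- pv_equiv track=rewrite | github.com/joshanashakya/dissertation | workspace/dataset/java-python/GeeksForGeeks/4728/A/2.py | findModuloByM
-- ===== SOURCE A (Python) =====
-- def power(x, y, p) :
--
--     # Initialize result
--     res = 1;
--
--     # Update x if it is >= p
--     x = x % p;
--
--     while (y > 0) :
--
--         # If y is odd, multiply x with result
--         if (y and 1) :
--             res = (res * x) % p;
--
--         # y must be even now
--         # y = y // 2
--         y = y >> 1;
--         x = (x * x) % p;
--
--     return res;
--
-- def findModuloByM(X, N, M) :
--
--     # Return the mod by M of smaller numbers
--     if (N < 6) :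
--
--         # Creating a string of N X's
--         temp = chr(48 + X) * N
--
--         # Converting the string to int
--         # and calculating the modulo
--         res = int(temp) % M;
--
--         return res;
--
--     # Checking the parity of N
--     if (N % 2 == 0) :
--
--         # Dividing the number into equal half
--         half = findModuloByM(X, N // 2, M) % M;
--
--         # Utilizing the formula for even N
--         res = (half * power(10, N // 2,
--                                 M) + half) % M;
--
--         return res;
--
--     else :
--
--         # Dividing the number into equal half
--         half = findModuloByM(X, N // 2, M) % M;
--
--         # Utilizing the formula for odd N
--         res = (half * power(10, N // 2 + 1, M) +
--                half * 10 + X) % M;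
--
--         return res;
-- ===== SOURCE B (Python) =====
-- def power(x, y, p) :
--
--     # Initialize result
--     res = 1;
--
--     # Update x if it is >= p
--     x = x % p;
--
--     while (y > 0) :
--
--         # If y is odd, multiply x with result
--         if (y and 1) :
--             res = (res * x) % p;
--
--         # y must be even now
--         # y = y // 2
--         y = y >> 1;
--         x = (x * x) % p;
--
--     return res;
--
-- def findModuloByM(X, N, M):
--     # Iterative version: record the halving chain of sizes, compute the
--     # base value for the smallest size directly, then rebuild
--     # the result bottom-up with the same even/odd combination formulas.
--     sizes = []
--     n = N
--     while n >= 6: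
--         sizes.append(n)
--         n //= 2
--     res = int(chr(48 + X) * n) % M
--     for n in reversed(sizes):
--         half = res % M
--         if n % 2 == 0:
--             res = (half * power(10, n // 2, M) + half) % M
--         else:
--             res = (half * power(10, n // 2 + 1, M) + half * 10 + X) % M
--     return res
-- ===== Notes on version B (the rewrite author's own statement) =====
-- stated objective: alternative
-- what changed: Replaces A's recursion with an explicit iteration: collect the halving chain of sizes top-down, compute the smallest case once, then fold back up through the recorded sizes with the same even/odd combination formulas; the quirky 'power' helper is kept identical so values match exactly.
import Mathlib
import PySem

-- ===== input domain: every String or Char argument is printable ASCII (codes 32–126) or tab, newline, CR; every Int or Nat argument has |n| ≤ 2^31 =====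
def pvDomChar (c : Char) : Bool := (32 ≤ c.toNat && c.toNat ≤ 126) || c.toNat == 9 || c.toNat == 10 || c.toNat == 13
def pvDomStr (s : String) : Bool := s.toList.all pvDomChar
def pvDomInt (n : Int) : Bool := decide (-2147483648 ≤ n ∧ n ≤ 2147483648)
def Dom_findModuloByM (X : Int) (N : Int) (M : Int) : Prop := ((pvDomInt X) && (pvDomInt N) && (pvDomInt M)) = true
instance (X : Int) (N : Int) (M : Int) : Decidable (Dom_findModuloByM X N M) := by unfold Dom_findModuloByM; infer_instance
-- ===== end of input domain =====

-- B replaces A's halving recursion by an explicit iteration (collect the size chain,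
-- digit-loop base case, fold back up with the same formulas): a different decomposition, same cost.

-- ===== PORT A =====
-- shared helper 'power' of both Python files (identical in Source A and Source B), transliterated:
-- the loop 'while y > 0' with 'if (y and 1)' (truthy whenever y ≠ 0) and 'y = y >> 1'
-- ('>> 1' on a positive int is exactly floor division by 2).
def powerLoop (x y p res : Int) : Int :=
  if _h : y > 0 then
    powerLoop (PySem.Int.mod (x * x) p) (PySem.Int.floordiv y 2) p
      (if y ≠ 0 then PySem.Int.mod (res * x) p else res)
  else res
termination_by y.toNat
decreasing_by
  have h2 : PySem.Int.floordiv y 2 = y / 2 := PySem.Int.floordiv_eq_ediv_of_pos (by omega)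
  omega

def power (x y p : Int) : Int := powerLoop (PySem.Int.mod x p) y p 1

-- A itself: recursion on N, halving; base case builds the string of N copies of chr(48+X)
-- and parses it with int(...) (ofChars?; none = ValueError, excluded by Pre_, defaulted to 0 here).
def findModuloByM (X : Int) (N : Int) (M : Int) : Int :=
  if h : N < 6 then
    PySem.Int.mod ((PySem.Int.ofChars? (List.replicate N.toNat (Char.ofNat (48 + X).toNat))).getD 0) M
  else if PySem.Int.mod N 2 = 0 then
    let half := PySem.Int.mod (findModuloByM X (PySem.Int.floordiv N 2) M) M
    PySem.Int.mod (half * power 10 (PySem.Int.floordiv N 2) M + half) M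
  else
    let half := PySem.Int.mod (findModuloByM X (PySem.Int.floordiv N 2) M) M
    PySem.Int.mod (half * power 10 (PySem.Int.floordiv N 2 + 1) M + half * 10 + X) M
termination_by N.toNat
decreasing_by
  all_goals
    have h2 : PySem.Int.floordiv N 2 = N / 2 := PySem.Int.floordiv_eq_ediv_of_pos (by omega)
    omega

-- ===== PORT B =====
-- the 'while n >= 6' loop of Source B, split into its two pieces of state:
-- the list of recorded sizes, and the final small n.
def sizesB (n : Int) : List Int :=
  if _h : n ≥ 6 then n :: sizesB (PySem.Int.floordiv n 2) else []
termination_by n.toNat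
decreasing_by
  have h2 : PySem.Int.floordiv n 2 = n / 2 := PySem.Int.floordiv_eq_ediv_of_pos (by omega)
  omega

def shrinkB (n : Int) : Int :=
  if _h : n ≥ 6 then shrinkB (PySem.Int.floordiv n 2) else n
termination_by n.toNat
decreasing_by
  have h2 : PySem.Int.floordiv n 2 = n / 2 := PySem.Int.floordiv_eq_ediv_of_pos (by omega)
  omega

-- Source B's base case 'int(chr(48+X) * n) % M' (same construction as A's base case)
def baseB (X n : Int) : Int :=
  (PySem.Int.ofChars? (List.replicate n.toNat (Char.ofNat (48 + X).toNat))).getD 0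

-- the body of Source B's 'for n in reversed(sizes)' loop
def stepB (X M res n : Int) : Int :=
  let half := PySem.Int.mod res M
  if PySem.Int.mod n 2 = 0 then
    PySem.Int.mod (half * power 10 (PySem.Int.floordiv n 2) M + half) M
  else
    PySem.Int.mod (half * power 10 (PySem.Int.floordiv n 2 + 1) M + half * 10 + X) M

def findModuloByM_alt (X : Int) (N : Int) (M : Int) : Int :=
  ((sizesB N).reverse).foldl (stepB X M) (PySem.Int.mod (baseB X (shrinkB N)) M)

-- ===== PRECONDITION & SPEC =====
-- Pre_ excludes exactly the inputs where A raises: X outside 0..9 or N < 1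
-- (int(temp) raises ValueError) and M = 0 (ZeroDivisionError).
def Pre_findModuloByM (X : Int) (N : Int) (M : Int) : Prop :=
  0 ≤ X ∧ X ≤ 9 ∧ 1 ≤ N ∧ M ≠ 0
instance (X : Int) (N : Int) (M : Int) : Decidable (Pre_findModuloByM X N M) := by
  unfold Pre_findModuloByM; infer_instance

def pvWitness_findModuloByM : Int × Int × Int := (7, 10, 9)

def Spec_findModuloByM (X : Int) (N : Int) (M : Int) (out : Int) : Prop := out = findModuloByM_alt X N M
instance (X : Int) (N : Int) (M : Int) (out : Int) : Decidable (Spec_findModuloByM X N M out) := by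
  unfold Spec_findModuloByM; infer_instance

-- ===== CLAIM (what is proved, stated in full; the proofs are below) =====
def Claim_equal_findModuloByM : Prop := ∀ (X : Int) (N : Int) (M : Int), Dom_findModuloByM X N M → Pre_findModuloByM X N M → Spec_findModuloByM X N M (findModuloByM X N M)

-- ===== LEMMAS AND PROOFS =====

lemma eq_aux (X M : Int) :
    ∀ k : Nat, ∀ N : Int, N.toNat ≤ k → 1 ≤ N →
      findModuloByM X N M = findModuloByM_alt X N M := by
  intro k
  induction k with
  | zero => intro N hk hN; omega
  | succ k ih =>
    intro N hk hN
    by_cases h6 : N < 6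
    · rw [findModuloByM, dif_pos h6, findModuloByM_alt,
        sizesB, dif_neg (by omega), shrinkB, dif_neg (by omega)]
      simp [baseB]
    · have h2 : PySem.Int.floordiv N 2 = N / 2 := PySem.Int.floordiv_eq_ediv_of_pos (by omega)
      have hrec : findModuloByM X (PySem.Int.floordiv N 2) M
          = findModuloByM_alt X (PySem.Int.floordiv N 2) M := by
        apply ih <;> omega
      have halt : findModuloByM_alt X N M
          = stepB X M (findModuloByM_alt X (PySem.Int.floordiv N 2) M) N := by
        rw [findModuloByM_alt, sizesB, dif_pos (by omega), shrinkB, dif_pos (by omega)]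
        simp [findModuloByM_alt]
      rw [findModuloByM, dif_neg h6, halt, ← hrec]
      simp only [stepB]

-- ===== VERDICT (by name: the statement is the Claim_ definition above) =====
theorem findModuloByM_spec : Claim_equal_findModuloByM := by
  intro X N M _ hpre
  obtain ⟨hX0, hX9, hN, hM⟩ := hpre
  exact eq_aux X M N.toNat N le_rfl hN
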